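-- pv_equiv track=rewrite | github.com/jgayle27/comp110-23s-workspace | exercises/ex07/dictionary.py | count
-- ===== SOURCE A (Python) =====
-- def count (count_list: list[str]) -> dict[str, int]:
--     new_dict: dict[str, int] = {}
--     for elem in count_list:
--         if elem in new_dict:
--             new_dict[elem] += 1
--         if elem not in new_dict:
--             new_dict[elem] = 1
--     return(new_dict)
-- ===== SOURCE B (Python) =====
-- def count(count_list: list[str]) -> dict[str, int]:
--     # sort, then one run-length pass over consecutive equal elements;
--     # emit in first-occurrence order so the dict equals A's (dict == ignores order anyway)
--     counts: dict[str, int] = {}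
--     run_elem = None
--     run_len = 0
--     for elem in sorted(count_list):
--         if run_elem == elem:
--             run_len += 1
--         else:
--             if run_len > 0:
--                 counts[run_elem] = run_len
--             run_elem = elem
--             run_len = 1
--     if run_len > 0:
--         counts[run_elem] = run_len
--     return {e: counts.get(e, 0) for e in dict.fromkeys(count_list)}
-- ===== Notes on version B (the rewrite author's own statement) =====
-- stated objective: alternative
-- what changed: Replaces A's per-element dict membership-and-increment loop by sorting the list and grouping consecutive equal elements with a run-length pass, then emitting keys in first-occurrence order.
import Mathlib
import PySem

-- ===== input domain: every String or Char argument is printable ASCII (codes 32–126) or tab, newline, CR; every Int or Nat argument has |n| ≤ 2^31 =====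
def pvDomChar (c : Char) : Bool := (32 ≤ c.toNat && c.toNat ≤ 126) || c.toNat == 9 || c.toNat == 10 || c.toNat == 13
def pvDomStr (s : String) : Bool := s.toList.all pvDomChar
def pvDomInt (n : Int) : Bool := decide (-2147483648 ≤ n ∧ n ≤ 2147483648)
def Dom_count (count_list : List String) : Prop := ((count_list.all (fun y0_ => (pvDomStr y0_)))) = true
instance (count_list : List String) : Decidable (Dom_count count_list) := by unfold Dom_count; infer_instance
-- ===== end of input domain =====

-- B sorts and groups consecutive equal elements instead of A's dict of running increments; return values are identical.

-- ===== PORT A =====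
-- one loop iteration of A: two successive if-statements on membership
def countStep (d : PySem.Dict String Int) (elem : String) : PySem.Dict String Int :=
  let d1 := if d.contains elem then d.insert elem (d.getD elem 0 + 1) else d
  if ¬ d1.contains elem then d1.insert elem 1 else d1

def count (count_list : List String) : List (String × Int) :=
  (count_list.foldl countStep PySem.Dict.empty).items

-- ===== PORT B =====
-- 'if run_len > 0: counts[run_elem] = run_len' (run_elem is a str whenever run_len > 0)
def flushRun (d : PySem.Dict String Int) (r : Option String) (k : Int) : PySem.Dict String Int :=
  if 0 < k then (match r with | some rv => d.insert rv k | none => d) else d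

-- one iteration of B's loop over the sorted list, state = (counts, run_elem, run_len)
def runStep (st : PySem.Dict String Int × Option String × Int) (e : String) :
    PySem.Dict String Int × Option String × Int :=
  let (d, r, k) := st
  if r == some e then (d, r, k + 1) else (flushRun d r k, some e, 1)

def count_alt (count_list : List String) : List (String × Int) :=
  let st := (PySem.List.sorted count_list (fun x => x) false).foldl runStep (PySem.Dict.empty, none, 0)
  let counts := flushRun st.1 st.2.1 st.2.2
  (PySem.List.dedup count_list).map (fun e => (e, counts.getD e 0))

-- ===== PRECONDITION & SPEC =====
def Spec_count (count_list : List String) (out : List (String × Int)) : Prop := out = count_alt count_list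
instance (count_list : List String) (out : List (String × Int)) : Decidable (Spec_count count_list out) := by unfold Spec_count; infer_instance

-- ===== CLAIM (what is proved, stated in full; the proofs are below) =====
def Claim_equal_count : Prop := ∀ (count_list : List String), Dom_count count_list → Spec_count count_list (count count_list)

-- ===== LEMMAS AND PROOFS =====

-- A's two-if step is exactly the Counter insert step
theorem countStep_eq (d : PySem.Dict String Int) (e : String) :
    countStep d e = d.insert e (d.getD e 0 + 1) := by
  unfold countStep
  by_cases h : d.contains e = true
  · simp [h, PySem.Dict.contains_insert_self]
  · rw [PySem.Dict.getD_of_not_contains (h := by simpa using h)]; simp [h]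

-- invariant of B's run-length loop over a sorted suffix, started mid-run at (d, some r, k)
theorem runFold_getD (s : List String) : ∀ (d : PySem.Dict String Int) (r : String) (k : Int),
    0 < k → s.Pairwise (· ≤ ·) → (∀ x ∈ s, r ≤ x) →
    ∀ e, (flushRun (s.foldl runStep (d, some r, k)).1 (s.foldl runStep (d, some r, k)).2.1
            (s.foldl runStep (d, some r, k)).2.2).getD e 0
      = if e = r then k + (s.count r : Int) else if e ∈ s then (s.count e : Int) else d.getD e 0 := by
  induction s with
  | nil =>
    intro d r k hk _ _ e
    simp [flushRun, hk, PySem.Dict.getD_insert]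
  | cons a t ih =>
    intro d r k hk hs hr e
    have hra : r ≤ a := hr a (by simp)
    by_cases hae : a = r
    · subst hae
      simp only [List.foldl_cons, runStep, beq_self_eq_true, if_true]
      rw [ih d a (k + 1) (by omega) hs.of_cons (fun x hx => hr x (by simp [hx]))]
      by_cases her : e = a
      · subst her; simp; ring
      · simp [her, Ne.symm her]
    · have hlt : r < a := lt_of_le_of_ne hra (fun h => hae h.symm)
      have hstep : runStep (d, some r, k) a = (d.insert r k, some a, 1) := by
        simp [runStep, flushRun, hk, Ne.symm hae]
      have hrt : ∀ x ∈ t, r < x := fun x hx =>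
        lt_of_lt_of_le hlt (List.rel_of_pairwise_cons hs hx)
      rw [List.foldl_cons, hstep,
        ih (d.insert r k) a 1 (by omega) hs.of_cons (fun x hx => List.rel_of_pairwise_cons hs hx)]
      have hrnt : r ∉ t := fun h => lt_irrefl r (hrt r h)
      by_cases her : e = r
      · subst her
        simp [hae, Ne.symm hae, hrnt, List.count_eq_zero_of_not_mem hrnt]
      · by_cases hea : e = a
        · subst hea; simp [her]; ring
        · by_cases het : e ∈ t
          · simp [her, het, hea, Ne.symm hea]
          · simp [her, hea, het, PySem.Dict.getD_insert]

-- B's counts dict holds exactly the multiplicities of the input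
theorem counts_getD (l : List String) (e : String) :
    (flushRun ((PySem.List.sorted l (fun x => x) false).foldl runStep (PySem.Dict.empty, none, 0)).1
        ((PySem.List.sorted l (fun x => x) false).foldl runStep (PySem.Dict.empty, none, 0)).2.1
        ((PySem.List.sorted l (fun x => x) false).foldl runStep (PySem.Dict.empty, none, 0)).2.2).getD e 0
      = (l.count e : Int) := by
  have hperm : (PySem.List.sorted l (fun x => x) false).Perm l := PySem.List.sorted_perm l _ _
  rw [← hperm.count_eq e]
  rcases hsl : PySem.List.sorted l (fun x => x) false with _ | ⟨m, t⟩
  · simp [flushRun]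
  · have hp : (m :: t).Pairwise (· ≤ ·) := by
      have := PySem.List.sorted_pairwise l (fun x => x)
      rw [hsl] at this; exact this
    have hstep : runStep (PySem.Dict.empty, none, 0) m = (PySem.Dict.empty, some m, 1) := by
      simp [runStep, flushRun]
    rw [List.foldl_cons, hstep,
      runFold_getD t PySem.Dict.empty m 1 (by omega) hp.of_cons
        (fun x hx => List.rel_of_pairwise_cons hp hx)]
    by_cases hem : e = m
    · subst hem; simp; ring
    · by_cases het : e ∈ t
      · simp [het, hem, Ne.symm hem]
      · simp [hem, Ne.symm hem, het, List.count_eq_zero_of_not_mem het]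

-- ===== VERDICT (by name: the statement is the Claim_ definition above) =====
theorem count_spec : Claim_equal_count := by
  intro l _
  unfold Spec_count count count_alt
  have hstep : countStep = (fun d x => d.insert x (d.getD x 0 + 1)) := by
    funext d e; exact countStep_eq d e
  rw [hstep, PySem.Dict.foldl_insert_getD_add_one_eq_counter, PySem.Dict.items_counter]
  simp only [PySem.List.dedup_eq_ofList]
  exact List.map_congr_left (fun e _ => by rw [counts_getD l e])
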